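-- pv_equiv track=rewrite | github.com/pauloday/artbot | src/artbot/parse_prompt.py | apply_mods
-- ===== SOURCE A (Python) =====
-- pop_new_tok = '--'
--
-- pop_old_tok = '__'
--
-- clear_tok = '||'
--
-- def apply_mod(mod, part, old_prompts):
--     new_prompts = old_prompts.copy()
--     if mod == pop_new_tok:
--         new_prompts.pop()
--     if mod == pop_old_tok:
--         new_prompts.pop(0)
--     if mod == clear_tok:
--         return part
--     return part[0], new_prompts + part[1]
--
-- def apply_mods(parts, prompts_list, mods):
--     if len(parts) == 0:
--         return prompts_list
--     part = parts.pop(0)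
--     mod = mods.pop(0)
--     last_prompt = prompts_list[-1][1]
--     mod_prompt = apply_mod(mod, part, last_prompt)
--     prompts_list.append(mod_prompt)
--     prompts_list = apply_mods(parts, prompts_list, mods)
--     return prompts_list
-- ===== SOURCE B (Python) =====
-- pop_new_tok = '--'
--
-- pop_old_tok = '__'
--
-- clear_tok = '||'
--
-- def apply_mods(parts, prompts_list, mods):
--     # Iterative while-loop version; same front-pop mutations of parts/mods
--     # and same append mutation of prompts_list as the recursive original.
--     while parts:
--         part = parts.pop(0)
--         mod = mods.pop(0)
--         last = prompts_list[-1][1]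
--         if mod == clear_tok:
--             entry = part
--         elif mod == pop_new_tok:
--             entry = (part[0], last[:-1] + part[1])
--         elif mod == pop_old_tok:
--             entry = (part[0], last[1:] + part[1])
--         else:
--             entry = (part[0], last + part[1])
--         prompts_list.append(entry)
--     return prompts_list
-- ===== Notes on version B (the rewrite author's own statement) =====
-- stated objective: simpler
-- what changed: Tail recursion with a copy/pop helper is replaced by a single iterative while-loop that inlines the mod dispatch as one if/elif chain using slices instead of list.copy()+pop.
import Mathlib
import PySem

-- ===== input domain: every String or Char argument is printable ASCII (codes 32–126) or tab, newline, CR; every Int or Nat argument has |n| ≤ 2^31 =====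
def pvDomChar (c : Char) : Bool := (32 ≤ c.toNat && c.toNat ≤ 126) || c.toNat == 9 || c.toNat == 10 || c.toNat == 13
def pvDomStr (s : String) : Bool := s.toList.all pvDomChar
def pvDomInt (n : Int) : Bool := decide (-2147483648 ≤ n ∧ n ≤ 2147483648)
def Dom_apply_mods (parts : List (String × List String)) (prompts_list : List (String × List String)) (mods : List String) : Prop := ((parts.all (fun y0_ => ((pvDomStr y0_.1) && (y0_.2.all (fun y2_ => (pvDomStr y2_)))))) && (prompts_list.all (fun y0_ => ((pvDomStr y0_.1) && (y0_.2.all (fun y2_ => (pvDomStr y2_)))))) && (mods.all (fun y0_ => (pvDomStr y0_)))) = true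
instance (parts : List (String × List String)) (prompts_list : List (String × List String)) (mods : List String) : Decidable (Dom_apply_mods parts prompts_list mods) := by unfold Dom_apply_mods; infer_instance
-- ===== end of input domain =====

-- B replaces A's tail recursion + copy/pop helper by one iterative loop (a fold over parts
-- carrying (prompts_list, mods)) with the mod dispatch inlined as an if-chain over slices.
-- Note: the Python A mutates parts/mods (pop(0)) and prompts_list (append); B performs the
-- same mutations; the equivalence proved here is about the return value.

-- ===== PORT A =====
-- apply_mod: 'new_prompts.pop()' / 'new_prompts.pop(0)' raise IndexError on an empty list in
-- Python; the port uses dropLast/tail there (Pre_ excludes pop mods altogether).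
def apply_mod (mod : String) (part : String × List String) (old_prompts : List String) : String × List String :=
  let new_prompts := old_prompts
  let new_prompts := if mod = "--" then new_prompts.dropLast else new_prompts
  let new_prompts := if mod = "__" then new_prompts.tail else new_prompts
  if mod = "||" then part
  else (part.1, new_prompts ++ part.2)

-- 'mods.pop(0)' and 'prompts_list[-1]' raise in Python when the list is empty; the port uses
-- defaults there and Pre_ excludes those inputs.
def apply_mods (parts : List (String × List String)) (prompts_list : List (String × List String)) (mods : List String) : List (String × List String) :=
  match parts with
  | [] => prompts_list
  | part :: parts' =>
      let mod := mods.head?.getD ""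
      let mods' := mods.tail
      let last_prompt := (prompts_list.getLast?.getD ("", [])).2
      let mod_prompt := apply_mod mod part last_prompt
      apply_mods parts' (prompts_list ++ [mod_prompt]) mods'

-- ===== PORT B =====
-- the while-loop of Source B: each iteration pops the front of parts and mods and appends one
-- entry; transliterated as a fold over parts with state (prompts_list, mods).
def apply_mods_alt (parts : List (String × List String)) (prompts_list : List (String × List String)) (mods : List String) : List (String × List String) :=
  (parts.foldl
    (fun (st : List (String × List String) × List String) part =>
      let mod := st.2.head?.getD ""
      let last := (st.1.getLast?.getD ("", [])).2
      let entry :=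
        if mod = "||" then part
        else if mod = "--" then (part.1, PySem.List.slice last none (some (-1)) ++ part.2)
        else if mod = "__" then (part.1, PySem.List.slice last (some 1) none ++ part.2)
        else (part.1, last ++ part.2)
      (st.1 ++ [entry], st.2.tail))
    (prompts_list, mods)).1

-- ===== PRECONDITION & SPEC =====
-- popSafe tracks ONLY the length of the running last prompt list — the one piece of run
-- state that decides whether Python's new_prompts.pop()/pop(0) raises IndexError.
def popSafe : List (String × List String) → List String → Nat → Bool
  | [], _, _ => true
  | _ :: _, [], _ => true
  | (_, l) :: ps, m :: ms, k =>
    if m = "||" then popSafe ps ms l.length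
    else if m = "--" || m = "__" then decide (k ≠ 0) && popSafe ps ms (k - 1 + l.length)
    else popSafe ps ms (k + l.length)

-- Pre_ is exactly where the Python A returns: it raises IndexError iff parts is nonempty and
-- prompts_list is empty, or mods runs out before parts, or a pop mod ('--'/'__') meets an
-- empty running last prompt list (the popSafe length condition).
def Pre_apply_mods (parts : List (String × List String)) (prompts_list : List (String × List String)) (mods : List String) : Prop :=
  parts = [] ∨ (prompts_list ≠ [] ∧ parts.length ≤ mods.length ∧
    popSafe parts mods (prompts_list.getLast?.getD ("", [])).2.length = true)
instance (parts : List (String × List String)) (prompts_list : List (String × List String)) (mods : List String) : Decidable (Pre_apply_mods parts prompts_list mods) := by unfold Pre_apply_mods; infer_instance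

def pvWitness_apply_mods : (List (String × List String)) × (List (String × List String)) × List String :=
  ([("a cat", ["oil painting"]), ("a dog", [])],
   [("start", ["sketch"])],
   ["||", "vivid"])

def Spec_apply_mods (parts : List (String × List String)) (prompts_list : List (String × List String)) (mods : List String) (out : List (String × List String)) : Prop := out = apply_mods_alt parts prompts_list mods
instance (parts : List (String × List String)) (prompts_list : List (String × List String)) (mods : List String) (out : List (String × List String)) : Decidable (Spec_apply_mods parts prompts_list mods out) := by unfold Spec_apply_mods; infer_instance

-- ===== CLAIM (what is proved, stated in full; the proofs are below) =====
def Claim_equal_apply_mods : Prop := ∀ (parts : List (String × List String)) (prompts_list : List (String × List String)) (mods : List String), Dom_apply_mods parts prompts_list mods → Pre_apply_mods parts prompts_list mods → Spec_apply_mods parts prompts_list mods (apply_mods parts prompts_list mods)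

-- ===== LEMMAS AND PROOFS =====

-- the two ports agree on every input (even outside Pre_, whose job is Python-faithfulness)
theorem apply_mods_eq_alt (parts : List (String × List String)) (prompts_list : List (String × List String)) (mods : List String) :
    apply_mods parts prompts_list mods = apply_mods_alt parts prompts_list mods := by
  induction parts generalizing prompts_list mods with
  | nil => simp [apply_mods, apply_mods_alt]
  | cons part parts' ih =>
      rw [apply_mods, apply_mods_alt, List.foldl_cons]
      rw [← apply_mods_alt, ih]
      congr 1
      simp only [apply_mod]
      by_cases h1 : mods.head?.getD "" = "||" <;>
      by_cases h2 : mods.head?.getD "" = "--" <;>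
      by_cases h3 : mods.head?.getD "" = "__" <;>
        simp_all [PySem.List.slice_to_neg_one, PySem.List.slice_from_one]

-- ===== VERDICT (by name: the statement is the Claim_ definition above) =====
theorem apply_mods_spec : Claim_equal_apply_mods := by
  intro parts prompts_list mods _ _
  unfold Spec_apply_mods
  exact apply_mods_eq_alt parts prompts_list mods
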